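-- pv_equiv track=rewrite | github.com/ncduy0303/advent-of-code | 2025/6/solve.py | calculate_column_results
-- ===== SOURCE A (Python) =====
-- from typing import List
--
-- def apply_operator(a: int, b: int, operator: str) -> int:
--     if operator == '+':
--         return a + b
--     elif operator == '*':
--         return a * b
--     else:
--         raise ValueError(f"Unknown operator: {operator}")
--
-- def calculate_column_results(matrix: List[List[int]], operators: List[str]) -> int:
--     total = 0
--     for col in range(len(matrix[0])):
--         col_values = [matrix[row][col] for row in range(len(matrix))]
--         result = col_values[0]
--         for row in range(1, len(col_values)):
--             result = apply_operator(result, col_values[row], operators[col])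
--         total += result
--     return total
-- ===== SOURCE B (Python) =====
-- from typing import List
--
-- def apply_operator(a: int, b: int, operator: str) -> int:
--     if operator == '+':
--         return a + b
--     elif operator == '*':
--         return a * b
--     else:
--         raise ValueError(f"Unknown operator: {operator}")
--
-- def calculate_column_results(matrix: List[List[int]], operators: List[str]) -> int:
--     results = list(matrix[0])
--     for row in matrix[1:]:
--         for col in range(len(results)):
--             results[col] = apply_operator(results[col], row[col], operators[col])
--     return sum(results)
-- ===== Notes on version B (the rewrite author's own statement) =====
-- stated objective: alternative
-- what changed: B streams the matrix row-by-row, maintaining a per-column accumulator array seeded from the first row and updated in place, instead of extracting each column into a fresh list and folding it independently; the pass carries partial column folds rather than a scalar total.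
import Mathlib
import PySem

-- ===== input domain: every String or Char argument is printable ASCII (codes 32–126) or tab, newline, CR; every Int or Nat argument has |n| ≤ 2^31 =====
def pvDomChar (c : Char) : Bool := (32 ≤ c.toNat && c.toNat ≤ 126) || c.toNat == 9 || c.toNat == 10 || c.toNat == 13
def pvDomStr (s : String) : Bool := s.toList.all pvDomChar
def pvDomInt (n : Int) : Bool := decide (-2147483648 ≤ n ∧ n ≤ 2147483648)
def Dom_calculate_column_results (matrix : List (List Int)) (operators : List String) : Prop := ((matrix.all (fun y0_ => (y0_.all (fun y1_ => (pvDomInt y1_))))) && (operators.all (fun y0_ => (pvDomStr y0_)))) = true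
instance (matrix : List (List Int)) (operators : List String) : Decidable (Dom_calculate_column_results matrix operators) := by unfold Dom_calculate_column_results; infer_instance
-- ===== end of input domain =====

-- B streams the matrix row-by-row with a per-column accumulator array instead of folding each column independently (same cost; the proof is of return-value equality on Pre_).


-- ===== PORT A =====
-- shared helper: apply_operator; 'none' = the ValueError branch
def applyOperator (a b : Int) (op : String) : Option Int :=
  if op = "+" then some (a + b)
  else if op = "*" then some (a * b)
  else none

def calculate_column_results (matrix : List (List Int)) (operators : List String) : Int :=
  let row0 := PySem.List.pyGetD matrix 0 []
  (PySem.List.pyRange 0 (row0.length : Int) 1).foldl (fun total col =>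
    let colValues := (PySem.List.pyRange 0 (matrix.length : Int) 1).map
        (fun row => PySem.List.pyGetD (PySem.List.pyGetD matrix row []) col 0)
    let result := PySem.List.pyGetD colValues 0 0
    let result := (PySem.List.pyRange 1 (colValues.length : Int) 1).foldl
        (fun r row => (applyOperator r (PySem.List.pyGetD colValues row 0)
            (PySem.List.pyGetD operators col "")).getD 0) result
    total + result) 0

-- ===== PORT B =====
def calculate_column_results_alt (matrix : List (List Int)) (operators : List String) : Int :=
  let results0 := PySem.List.pyGetD matrix 0 []
  let results := (PySem.List.slice matrix (some 1) none).foldl (fun results row =>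
      (List.range results.length).foldl (fun rs col =>
        rs.set col ((applyOperator (rs.getD col 0) (PySem.List.pyGetD row (col : Int) 0)
            (PySem.List.pyGetD operators (col : Int) "")).getD 0)) results) results0
  results.sum

-- ===== PRECONDITION & SPEC =====
-- Pre_ = exactly the inputs where Python A returns: nonempty matrix (else IndexError on matrix[0]),
-- every row at least as long as the first (else IndexError on matrix[row][col]), and — only when the
-- matrix has a second row, since A's inner loop is lazy — operators covering every column with '+' or '*'
-- (else IndexError / ValueError).
def Pre_calculate_column_results (matrix : List (List Int)) (operators : List String) : Prop :=
  matrix ≠ [] ∧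
  (∀ row ∈ matrix, (matrix.headD []).length ≤ row.length) ∧
  (2 ≤ matrix.length →
    (matrix.headD []).length ≤ operators.length ∧
    ∀ op ∈ operators.take (matrix.headD []).length, op = "+" ∨ op = "*")
instance (matrix : List (List Int)) (operators : List String) : Decidable (Pre_calculate_column_results matrix operators) := by unfold Pre_calculate_column_results; infer_instance
def pvWitness_calculate_column_results : List (List Int) × List String := ([[1, 2], [3, 4], [5, 6]], ["+", "*"])

def Spec_calculate_column_results (matrix : List (List Int)) (operators : List String) (out : Int) : Prop := out = calculate_column_results_alt matrix operators
instance (matrix : List (List Int)) (operators : List String) (out : Int) : Decidable (Spec_calculate_column_results matrix operators out) := by unfold Spec_calculate_column_results; infer_instance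

-- ===== CLAIM (what is proved, stated in full; the proofs are below) =====
def Claim_equal_calculate_column_results : Prop := ∀ (matrix : List (List Int)) (operators : List String), Dom_calculate_column_results matrix operators → Pre_calculate_column_results matrix operators → Spec_calculate_column_results matrix operators (calculate_column_results matrix operators)

-- ===== LEMMAS AND PROOFS =====

-- the per-column scalar step both programs take, with list reads resolved to getD
def pvStep (operators : List String) (col : Nat) (r : Int) (row : List Int) : Int :=
  (applyOperator r (row.getD col 0) (operators.getD col "")).getD 0

-- B's inner index loop on a cons cell leaves the head alone; the tail sees shifted indices
theorem pv_foldl_setShift (g : Int → Nat → Int) (L : List Nat) :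
    ∀ (x : Int) (t : List Int),
      L.foldl (fun l col => l.set (col + 1) (g (l.getD (col + 1) 0) (col + 1))) (x :: t)
        = x :: L.foldl (fun l col => l.set col (g (l.getD col 0) (col + 1))) t := by
  induction L with
  | nil => intro x t; rfl
  | cons c L ih =>
      intro x t
      simp only [List.foldl_cons, List.set_cons_succ, List.getD_cons_succ]
      exact ih x _

-- B's inner index loop over range(len(results)) is a map-with-index
theorem pv_foldl_range_set (g : Int → Nat → Int) (rs : List Int) :
    (List.range rs.length).foldl (fun l col => l.set col (g (l.getD col 0) col)) rs
      = rs.mapIdx (fun col a => g a col) := by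
  induction rs generalizing g with
  | nil => rfl
  | cons a t ih =>
      rw [List.length_cons, List.range_succ_eq_map, List.foldl_cons]
      simp only [List.set_cons_zero, List.getD_cons_zero, List.foldl_map]
      rw [pv_foldl_setShift g, List.mapIdx_cons, ih (fun a col => g a (col + 1))]

-- streaming the rows through mapIdx computes, at each index, the per-column fold
theorem pv_foldl_mapIdx_getD (h : List Int → Int → Nat → Int) (rest : List (List Int)) :
    ∀ (rs : List Int) (col : Nat), col < rs.length →
      (rest.foldl (fun l row => l.mapIdx (fun c a => h row a c)) rs).getD col 0
        = rest.foldl (fun r row => h row r col) (rs.getD col 0) := by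
  induction rest with
  | nil => intro rs col _; rfl
  | cons row rest ih =>
      intro rs col hcol
      rw [List.foldl_cons, ih _ col (by simpa using hcol), List.foldl_cons]
      congr 1
      rw [List.getD_eq_getElem _ _ (by simpa using hcol), List.getElem_mapIdx,
        List.getD_eq_getElem _ _ hcol]

theorem pv_foldl_mapIdx_length (h : List Int → Int → Nat → Int) (rest : List (List Int)) :
    ∀ (rs : List Int),
      (rest.foldl (fun l row => l.mapIdx (fun c a => h row a c)) rs).length = rs.length := by
  induction rest with
  | nil => intro rs; rfl
  | cons row rest ih =>
      intro rs
      rw [List.foldl_cons, ih, List.length_mapIdx]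

-- reading a list through range indices is the list itself (mapped)
theorem pv_map_range_getD {α β : Type} (h : α → β) (d : α) (l : List α) :
    (List.range l.length).map (fun k => h (l.getD k d)) = l.map h := by
  induction l with
  | nil => rfl
  | cons a t ih =>
      rw [List.length_cons, List.range_succ_eq_map, List.map_cons, List.map_map]
      simp only [Function.comp_def, Nat.succ_eq_add_one, List.getD_cons_succ,
        List.getD_cons_zero, List.map_cons]
      rw [ih]

-- a list's sum as a sum over its indices
theorem pv_sum_eq_range (l : List Int) :
    l.sum = ((List.range l.length).map (fun i => l.getD i 0)).sum := by
  have h := pv_map_range_getD (fun x : Int => x) 0 l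
  simp only [List.map_id_fun', id] at h
  simp only [h]

-- B unfolded to a sum of per-column folds
theorem pv_alt_eq (r0 : List Int) (rest : List (List Int)) (operators : List String) :
    calculate_column_results_alt (r0 :: rest) operators
      = ((List.range r0.length).map
          (fun col => rest.foldl (fun r row => pvStep operators col r row) (r0.getD col 0))).sum := by
  have hF : (fun (results row : List Int) =>
      (List.range results.length).foldl (fun rs col =>
        rs.set col ((applyOperator (rs.getD col 0) (PySem.List.pyGetD row (col : Int) 0)
            (PySem.List.pyGetD operators (col : Int) "")).getD 0)) results)
      = fun results row => results.mapIdx (fun c a => pvStep operators c a row) := by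
    funext results row
    rw [pv_foldl_range_set (fun a col =>
      (applyOperator a (PySem.List.pyGetD row (col : Int) 0)
        (PySem.List.pyGetD operators (col : Int) "")).getD 0)]
    simp [pvStep]
  simp only [calculate_column_results_alt, PySem.List.pyGetD_zero_cons,
    PySem.List.slice_from_one, List.tail_cons, hF]
  rw [pv_sum_eq_range, pv_foldl_mapIdx_length (fun row a c => pvStep operators c a row)]
  congr 1
  apply List.map_congr_left
  intro col hcol
  exact pv_foldl_mapIdx_getD (fun row a c => pvStep operators c a row) rest r0 col
    (List.mem_range.mp hcol)

-- A unfolded to the same sum of per-column folds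
theorem pv_a_eq (r0 : List Int) (rest : List (List Int)) (operators : List String) :
    calculate_column_results (r0 :: rest) operators
      = ((List.range r0.length).map
          (fun col => rest.foldl (fun r row => pvStep operators col r row) (r0.getD col 0))).sum := by
  simp only [calculate_column_results, PySem.List.pyGetD_zero_cons]
  rw [PySem.List.foldl_add, zero_add, PySem.List.pyRange_zero_nat r0.length, List.map_map]
  congr 1
  apply List.map_congr_left
  intro col _
  simp only [Function.comp_def]
  rw [PySem.List.pyRange_zero_nat (r0 :: rest).length, List.map_map]
  simp only [Function.comp_def, PySem.List.pyGetD_natCast]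
  rw [pv_map_range_getD (fun row : List Int => row.getD col 0) ([] : List Int) (r0 :: rest)]
  simp only [List.map_cons, PySem.List.pyGetD_zero_cons]
  rw [PySem.List.foldl_pyRange_pyGetD' (r0.getD col 0 :: List.map (fun row => row.getD col 0) rest) 0
    (fun r v => (applyOperator r v (operators.getD col "")).getD 0)
    (r0.getD col 0) (by omega : (0 : Int) ≤ 1)]
  simp only [Int.toNat_one, List.drop_one, List.tail_cons, List.foldl_map, pvStep]

-- ===== VERDICT (by name: the statement is the Claim_ definition above) =====
theorem calculate_column_results_spec : Claim_equal_calculate_column_results := by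
  intro matrix operators _ hPre
  obtain ⟨hne, -, -⟩ := hPre
  obtain ⟨r0, rest, rfl⟩ : ∃ r0 rest, matrix = r0 :: rest := by
    cases matrix with
    | nil => exact absurd rfl hne
    | cons a t => exact ⟨a, t, rfl⟩
  unfold Spec_calculate_column_results
  rw [pv_a_eq, pv_alt_eq]
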